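-- pv_equiv track=rewrite | github.com/miny-genie/BOJ | acmicpc_1239.py | how_many_half
-- ===== SOURCE A (Python) =====
-- from itertools import permutations
--
-- def how_many_half(lst):
--     if max(lst) > 50:
--         return 0
--
--     MAX = 0
--
--     for case in permutations(lst, len(lst)):
--         tmp, count, prefixsum = 0, 0, []
--
--         for i in case:
--             tmp += i
--             prefixsum.append(tmp)
--
--         for i in prefixsum:
--             if (i + 50) in prefixsum:
--                 count += 1
--
--         MAX = max(MAX, count)
--
--     return MAX
-- ===== SOURCE B (Python) =====
-- def how_many_half(lst):
--     if max(lst) > 50: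
--         return 0
--
--     # Backtracking over positions: build each permutation incrementally, keeping a
--     # running multiset (counter) of the prefix sums produced so far and updating the
--     # pair-count by a O(1) delta per appended prefix sum instead of re-scanning the
--     # whole prefix-sum list per finished permutation.
--     def go(remaining, tmp, counter, count):
--         if not remaining:
--             return count
--         best = 0
--         for i in range(len(remaining)):
--             p = tmp + remaining[i]
--             delta = (1 if counter.get(p + 50, 0) > 0 else 0) \
--                     + (counter.get(p - 50, 0) if counter.get(p, 0) == 0 else 0)
--             counter[p] = counter.get(p, 0) + 1
--             best = max(best, go(remaining[:i] + remaining[i + 1:], p, counter, count + delta))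
--             counter[p] -= 1
--             if counter[p] == 0:
--                 del counter[p]
--         return best
--
--     return go(lst, 0, {}, 0)
-- ===== Notes on version B (the rewrite author's own statement) =====
-- stated objective: alternative
-- what changed: A enumerates itertools.permutations and for each finished permutation builds the prefix-sum list and runs a quadratic membership scan; B replaces this with recursive backtracking that builds each permutation in place while maintaining a multiset (counter) of the prefix sums seen so far and updating the pair-count by a constant-size delta per appended prefix sum, so no per-permutation passes remain.
-- outside the precondition, e.g. on how_many_half([]): A raises ValueError, B raises ValueError
import Mathlib
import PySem

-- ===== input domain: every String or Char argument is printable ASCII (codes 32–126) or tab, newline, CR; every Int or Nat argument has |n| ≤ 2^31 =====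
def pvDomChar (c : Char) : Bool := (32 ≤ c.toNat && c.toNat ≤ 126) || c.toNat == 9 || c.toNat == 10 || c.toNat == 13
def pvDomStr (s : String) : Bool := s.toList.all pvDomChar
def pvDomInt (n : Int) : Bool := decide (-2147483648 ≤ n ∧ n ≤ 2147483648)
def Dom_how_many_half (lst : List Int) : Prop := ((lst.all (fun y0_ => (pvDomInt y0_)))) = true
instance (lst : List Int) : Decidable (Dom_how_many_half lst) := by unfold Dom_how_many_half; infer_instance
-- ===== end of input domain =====

-- B replaces A's per-permutation prefix-sum list and quadratic membership scan by recursive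
-- backtracking that maintains a counter of the prefix sums and an incrementally updated
-- pair-count; an alternative of the same exponential family.

-- ===== PORT A =====
def how_many_half (lst : List Int) : Int :=
  match PySem.List.max? lst id with
  | none => 0   -- unreachable under Pre_: Python's max([]) raises ValueError
  | some m =>
    if m > 50 then 0
    else
      (PySem.List.permutations lst lst.length).foldl
        (fun MAX case =>
          -- tmp, count, prefixsum loop: tmp += i; prefixsum.append(tmp)
          let st := case.foldl (fun (s : Int × List Int) i => (s.1 + i, s.2 ++ [s.1 + i])) (0, [])
          let prefixsum := st.2
          -- for i in prefixsum: if (i + 50) in prefixsum: count += 1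
          let count := prefixsum.foldl
            (fun c i => if prefixsum.contains (i + 50) then c + 1 else c) (0 : Int)
          max MAX count) 0

-- ===== PORT B =====
-- B's recursive helper `go`. The Python increments one shared counter and undoes the
-- increment after each branch; the port passes the (equal) updated dict into the recursive
-- call instead, and the cosmetic `del`-when-zero is dropped (all reads use .get(_, 0), so a
-- key with value 0 and an absent key are indistinguishable). remaining[i] for i in
-- range(len(remaining)) is ported as getD (the index is always in range); `.attach` is
-- termination scaffolding only.
def how_many_half_go (remaining : List Int) (tmp : Int) (counter : PySem.Dict Int Int)
    (count : Int) : Int :=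
  if remaining = [] then count
  else
    (List.range remaining.length).attach.foldl
      (fun best t =>
        let p := tmp + remaining.getD t.1 0
        let delta := (if 0 < counter.getD (p + 50) 0 then (1 : Int) else 0) +
                     (if counter.getD p 0 = 0 then counter.getD (p - 50) 0 else 0)
        max best (how_many_half_go (remaining.eraseIdx t.1) p
          (counter.insert p (counter.getD p 0 + 1)) (count + delta)))
      0
termination_by remaining.length
decreasing_by
  have ht : t.1 < remaining.length := List.mem_range.mp t.2
  simp only [List.length_eraseIdx, ht, if_pos]
  omega

def how_many_half_alt (lst : List Int) : Int :=
  match PySem.List.max? lst id with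
  | none => 0   -- unreachable under Pre_: Python's max([]) raises ValueError
  | some m =>
    if m > 50 then 0
    else how_many_half_go lst 0 PySem.Dict.empty 0

-- ===== PRECONDITION & SPEC =====
-- Pre_ excludes only the empty list, on which Python's max([]) raises ValueError.
def Pre_how_many_half (lst : List Int) : Prop := lst ≠ []
instance (lst : List Int) : Decidable (Pre_how_many_half lst) := by unfold Pre_how_many_half; infer_instance
def pvWitness_how_many_half : List Int := ([1, 2] : List Int)

def Spec_how_many_half (lst : List Int) (out : Int) : Prop := out = how_many_half_alt lst
instance (lst : List Int) (out : Int) : Decidable (Spec_how_many_half lst out) := by unfold Spec_how_many_half; infer_instance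

-- ===== CLAIM =====
def Claim_equal_how_many_half : Prop := ∀ (lst : List Int), Dom_how_many_half lst → Pre_how_many_half lst → Spec_how_many_half lst (how_many_half lst)

-- ===== LEMMAS AND PROOFS =====

-- The prefix-sum list of `case` continued from running sum `tmp`.
def pvPre (tmp : Int) : List Int → List Int
  | [] => []
  | x :: xs => (tmp + x) :: pvPre (tmp + x) xs

-- A's per-permutation count, as a countP over the prefix-sum list.
def pvCnt (S : List Int) : Int := (S.countP (fun x => decide ((x + 50) ∈ S)) : Int)

lemma pvCnt_nonneg (S : List Int) : 0 ≤ pvCnt S := by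
  unfold pvCnt; positivity

-- A's prefix-sum building fold, generalized over the start state.
lemma prefix_build (case : List Int) : ∀ (tmp : Int) (S : List Int),
    case.foldl (fun (s : Int × List Int) i => (s.1 + i, s.2 ++ [s.1 + i])) (tmp, S)
      = (tmp + case.sum, S ++ pvPre tmp case) := by
  induction case with
  | nil => intro tmp S; simp [pvPre]
  | cons x xs ih =>
    intro tmp S
    simp only [List.foldl_cons, ih, pvPre, List.sum_cons, List.append_assoc,
      List.singleton_append]
    rw [add_assoc]

-- Splitting a countP over a disjunction of predicates.
lemma countP_or (S : List Int) (a b : Int → Bool) :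
    S.countP (fun x => a x || b x) = S.countP a + S.countP (fun x => b x && !a x) := by
  induction S with
  | nil => rfl
  | cons x xs ih =>
    by_cases ha : a x <;> by_cases hb : b x <;>
      simp [ha, hb, ih] <;> omega

-- Nat form of the incremental-count step.
lemma cntN_append (S : List Int) (p : Int) :
    (S ++ [p]).countP (fun x => decide ((x + 50) ∈ S ++ [p]))
      = S.countP (fun x => decide ((x + 50) ∈ S))
        + (if (p + 50) ∈ S then 1 else 0)
        + (if p ∈ S then 0 else S.count (p - 50)) := by
  have hmem : ∀ y : Int, decide (y ∈ S ++ [p]) = (decide (y ∈ S) || decide (y = p)) := by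
    intro y
    by_cases h1 : y ∈ S <;> by_cases h2 : y = p <;> simp [h1, h2]
  simp only [hmem]
  rw [List.countP_append]
  have hs : List.countP (fun x => decide ((x + 50) ∈ S) || decide (x + 50 = p)) [p]
      = if (p + 50) ∈ S then 1 else 0 := by
    have hne : ¬ (p + 50 = p) := by omega
    by_cases h : (p + 50) ∈ S <;> simp [h, hne]
  rw [hs, countP_or S (fun x => decide ((x + 50) ∈ S)) (fun x => decide (x + 50 = p))]
  have hrest : S.countP (fun x => decide (x + 50 = p) && !decide ((x + 50) ∈ S))
      = if p ∈ S then 0 else S.count (p - 50) := by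
    by_cases hp : p ∈ S
    · rw [if_pos hp, List.countP_eq_zero]
      intro x _
      by_cases hxp : x + 50 = p
      · simp [hxp, hp]
      · simp [hxp]
    · rw [if_neg hp]
      have hcnt : S.count (p - 50) = S.countP (· == p - 50) := rfl
      rw [hcnt]
      apply List.countP_congr
      intro x _
      by_cases hxp : x + 50 = p
      · have hx50 : ¬ (x + 50) ∈ S := by rw [hxp]; exact hp
        have hx : x = p - 50 := by omega
        simp [hx, hp]
      · have hx : ¬ (x = p - 50) := by omega
        simp [hxp, hx]
  rw [hrest]
  omega

-- The incremental-count step: appending one prefix sum changes A's count by B's delta.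
lemma pvCnt_append (S : List Int) (p : Int) :
    pvCnt (S ++ [p]) = pvCnt S +
      ((if 0 < (S.count (p + 50) : Int) then (1 : Int) else 0) +
       (if (S.count p : Int) = 0 then (S.count (p - 50) : Int) else 0)) := by
  unfold pvCnt
  rw [cntN_append]
  have e1 : ((p + 50) ∈ S) ↔ (0 : Int) < (S.count (p + 50) : Int) := by
    rw [← List.count_pos_iff]
    omega
  have e2 : (p ∈ S) ↔ ¬ ((S.count p : Int) = 0) := by
    rw [← List.count_pos_iff]
    omega
  by_cases h1 : (p + 50) ∈ S <;> by_cases h2 : p ∈ S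
  · rw [if_pos h1, if_pos h2, if_pos (e1.mp h1), if_neg (e2.mp h2)]
    push_cast; ring
  · have hz : (S.count p : Int) = 0 := by
      rw [List.count_eq_zero.mpr h2]; rfl
    rw [if_pos h1, if_neg h2, if_pos (e1.mp h1), if_pos hz]
    push_cast; ring
  · rw [if_neg h1, if_pos h2, if_neg (fun hlt => h1 (e1.mpr hlt)), if_neg (e2.mp h2)]
    push_cast; ring
  · have hz : (S.count p : Int) = 0 := by
      rw [List.count_eq_zero.mpr h2]; rfl
    rw [if_neg h1, if_neg h2, if_neg (fun hlt => h1 (e1.mpr hlt)), if_pos hz]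
    push_cast; ring
-- Hoisting a running max out of a fold (all elements and the start nonnegative).
lemma foldl_max_shift (L : List Int) : ∀ (b : Int), 0 ≤ b → (∀ x ∈ L, 0 ≤ x) →
    L.foldl max b = max b (L.foldl max 0) := by
  induction L with
  | nil => intro b hb _; simp [max_eq_left hb]
  | cons x t ih =>
    intro b hb hL
    have hx : 0 ≤ x := hL x (by simp)
    have ht : ∀ y ∈ t, 0 ≤ y := fun y hy => hL y (by simp [hy])
    simp only [List.foldl_cons]
    rw [ih (max b x) (le_trans hx (le_max_right b x)) ht,
        ih (max 0 x) (le_max_left 0 x) ht, max_eq_right hx, max_assoc]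

-- A fold that folds max over value groups equals a fold of max with each group's maximum.
lemma foldl_max_bridge {ι : Type} (L : List ι) (F : Int → ι → Int) (V : ι → List Int)
    (G : ι → Int)
    (hF : ∀ (b : Int) (i : ι), i ∈ L → F b i = (V i).foldl max b)
    (hV : ∀ i ∈ L, ∀ x ∈ V i, 0 ≤ x)
    (hG : ∀ i ∈ L, (V i).foldl max 0 = G i) :
    ∀ (b : Int), 0 ≤ b → L.foldl F b = L.foldl (fun b i => max b (G i)) b := by
  induction L with
  | nil => intro b _; rfl
  | cons i t ih =>
    intro b hb
    have hGpos : 0 ≤ G i := by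
      rw [← hG i (by simp)]
      exact (PySem.List.le_foldl_max (V i) 0).1
    simp only [List.foldl_cons]
    rw [hF b i (by simp), foldl_max_shift (V i) b hb (hV i (by simp)), hG i (by simp)]
    exact ih (fun b j hj => hF b j (by simp [hj])) (fun j hj => hV j (by simp [hj]))
      (fun j hj => hG j (by simp [hj])) (max b (G i))
      (le_trans hGpos (le_max_right _ _))

-- Main invariant: `go` computes A's fold over all continuations of the current state.
-- S is the list of prefix sums already produced, `c` its counter, `pvCnt S` the count.
lemma go_eq : ∀ (n : Nat) (rem : List Int), rem.length = n →
    ∀ (S : List Int) (tmp : Int) (c : PySem.Dict Int Int),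
    (∀ k, c.getD k 0 = (S.count k : Int)) →
    how_many_half_go rem tmp c (pvCnt S) =
      (PySem.List.permutations rem rem.length).foldl
        (fun b case => max b (pvCnt (S ++ pvPre tmp case))) 0 := by
  intro n
  induction n using Nat.strong_induction_on with
  | _ n ih =>
    intro rem hlen S tmp c hc
    match rem with
    | [] =>
      rw [how_many_half_go, if_pos rfl]
      have hp : PySem.List.permutations ([] : List Int) (List.length ([] : List Int)) = [[]] := rfl
      rw [hp]
      simp [pvPre, max_eq_right (pvCnt_nonneg S)]
    | x :: xs =>
      have hxl : (x :: xs : List Int).length = Nat.succ xs.length := rfl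
      have hn : n = xs.length + 1 := by rw [← hlen]; rfl
      rw [how_many_half_go, if_neg (by simp)]
      rw [hxl, PySem.List.permutations.eq_2, List.foldl_flatMap]
      refine Eq.trans (List.foldl_attach
        (l := List.range (x :: xs : List Int).length)
        (f := fun best i =>
          let p := tmp + (x :: xs).getD i 0
          let delta := (if 0 < c.getD (p + 50) 0 then (1 : Int) else 0) +
                       (if c.getD p 0 = 0 then c.getD (p - 50) 0 else 0)
          max best (how_many_half_go ((x :: xs).eraseIdx i) p
            (c.insert p (c.getD p 0 + 1)) (pvCnt S + delta)))
        (b := 0)) ?_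
      refine Eq.symm (Eq.trans
        (foldl_max_bridge (List.range (x :: xs : List Int).length) _
          (fun i => ((PySem.List.permutations ((x :: xs).eraseIdx i) xs.length).map
              (fun q => (x :: xs).getD i 0 :: q)).map
              (fun case => pvCnt (S ++ pvPre tmp case)))
          (fun i =>
            let p := tmp + (x :: xs).getD i 0
            let delta := (if 0 < c.getD (p + 50) 0 then (1 : Int) else 0) +
                         (if c.getD p 0 = 0 then c.getD (p - 50) 0 else 0)
            how_many_half_go ((x :: xs).eraseIdx i) p
              (c.insert p (c.getD p 0 + 1)) (pvCnt S + delta))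
          ?_ ?_ ?_ 0 le_rfl) rfl)
      · -- hF: the flatMap group at i, folded, is the fold of V i
        intro b i hi
        have hi' : i < (x :: xs : List Int).length := List.mem_range.mp hi
        rw [List.getElem?_eq_getElem hi']
        simp only [List.foldl_map]
        congr 1
        funext acc case
        simp [List.getD_eq_getElem?_getD, List.getElem?_eq_getElem hi']
      · -- hV: every value in a group is a pvCnt, hence nonnegative
        intro i _ v hv
        obtain ⟨case, _, rfl⟩ := List.mem_map.mp hv
        exact pvCnt_nonneg _
      · -- hG: the group maximum is exactly B's loop-body value, by the IH
        intro i hi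
        have hi' : i < (x :: xs : List Int).length := List.mem_range.mp hi
        simp only [List.map_map]
        set p : Int := tmp + (x :: xs).getD i 0 with hp
        have hvfun : (fun case => pvCnt (S ++ pvPre tmp case)) ∘ (fun q => (x :: xs).getD i 0 :: q)
            = fun case' => pvCnt ((S ++ [p]) ++ pvPre p case') := by
          funext case'
          simp only [Function.comp_apply, pvPre, ← hp]
          rw [← List.append_cons]
        rw [hvfun]
        have hel : ((x :: xs).eraseIdx i).length = xs.length := by
          rw [List.length_eraseIdx, if_pos hi']
          rfl
        have hc' : ∀ k, (c.insert p (c.getD p 0 + 1)).getD k 0 = ((S ++ [p]).count k : Int) := by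
          intro k
          rw [PySem.Dict.getD_insert]
          by_cases hk : k = p
          · rw [if_pos hk, hc p, hk]
            have hcnt1 : List.count p (S ++ [p]) = List.count p S + 1 := by
              simp [List.count_append]
            rw [hcnt1]
            push_cast
            ring
          · rw [if_neg hk, hc k]
            have hone : List.count k [p] = 0 := by
              rw [List.count_eq_zero]
              simp [hk]
            simp [List.count_append, hone]
        have hiheq := ih xs.length (by omega) ((x :: xs).eraseIdx i) hel (S ++ [p]) p
          (c.insert p (c.getD p 0 + 1)) hc'
        rw [hel] at hiheq
        simp only [List.foldl_map]
        rw [← hiheq]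
        have hcount : pvCnt (S ++ [p]) = pvCnt S +
            ((if 0 < c.getD (p + 50) 0 then (1 : Int) else 0) +
             (if c.getD p 0 = 0 then c.getD (p - 50) 0 else 0)) := by
          rw [hc (p + 50), hc p, hc (p - 50)]
          exact pvCnt_append S p
        rw [hcount]

-- ===== VERDICT =====
theorem how_many_half_spec : Claim_equal_how_many_half := by
  intro lst _ _
  unfold Spec_how_many_half how_many_half how_many_half_alt
  cases PySem.List.max? lst id with
  | none => rfl
  | some m =>
    simp only
    split
    · rfl
    · have hB := go_eq lst.length lst rfl [] 0 PySem.Dict.empty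
        (fun k => by simp)
      have h0 : pvCnt ([] : List Int) = 0 := rfl
      rw [h0] at hB
      rw [hB]
      refine PySem.List.foldl_congr_mem _ _ _ 0 ?_
      intro acc case _
      rw [prefix_build case 0 []]
      show max acc ((pvPre 0 case).foldl
          (fun c i => if (pvPre 0 case).contains (i + 50) then c + 1 else c) 0)
        = max acc (pvCnt (pvPre 0 case))
      rw [PySem.List.foldl_count_if (fun i => (pvPre 0 case).contains (i + 50))
        (pvPre 0 case) 0]
      simp [pvCnt]
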